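-- pv_equiv track=rewrite | github.com/Natsu-Yutori/cyrene_tts | src/post_process.py | _smooth_activity
-- ===== SOURCE A (Python) =====
-- def _smooth_activity(activity: list[bool], hangover: int) -> list[bool]:
--     if hangover <= 0 or len(activity) == 0:
--         return activity
--
--     forward: list[bool] = []
--     hold = 0
--     for is_active in activity:
--         if is_active:
--             hold = hangover
--         else:
--             hold = max(hold - 1, 0)
--         forward.append(is_active or hold > 0)
--
--     backward = [False] * len(activity)
--     hold = 0
--     for idx in range(len(activity) - 1, -1, -1):
--         is_active = activity[idx]
--         if is_active:
--             hold = hangover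
--         else:
--             hold = max(hold - 1, 0)
--         backward[idx] = is_active or hold > 0
--
--     return [f or b for f, b in zip(forward, backward)]
-- ===== SOURCE B (Python) =====
-- def _smooth_activity(activity: list[bool], hangover: int) -> list[bool]:
--     if hangover <= 0 or len(activity) == 0:
--         return activity
--     n = len(activity)
--     prefix = [0]
--     c = 0
--     for a in activity:
--         c += 1 if a else 0
--         prefix.append(c)
--     return [prefix[min(n, i + hangover)] - prefix[max(0, i - hangover + 1)] > 0 for i in range(n)]
-- ===== Notes on version B (the rewrite author's own statement) =====
-- stated objective: alternative
-- what changed: Replaces the two forward/backward hangover-hold-counter sweeps plus a zip by a single prefix-sum of active counts and a per-index window test: output[i] is True iff the count of active elements in the window [i-hangover+1, i+hangover) is positive.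
import Mathlib
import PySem

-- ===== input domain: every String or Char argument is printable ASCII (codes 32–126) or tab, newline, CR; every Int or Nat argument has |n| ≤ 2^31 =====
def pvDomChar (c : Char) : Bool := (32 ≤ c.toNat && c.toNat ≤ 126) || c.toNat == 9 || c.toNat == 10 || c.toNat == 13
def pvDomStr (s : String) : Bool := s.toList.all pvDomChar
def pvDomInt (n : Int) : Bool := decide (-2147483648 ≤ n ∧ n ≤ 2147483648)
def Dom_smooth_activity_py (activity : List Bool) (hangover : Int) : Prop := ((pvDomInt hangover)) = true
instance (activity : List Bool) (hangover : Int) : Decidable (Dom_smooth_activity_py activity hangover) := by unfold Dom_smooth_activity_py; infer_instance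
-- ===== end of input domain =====

-- B replaces A's two forward/backward hold-counter sweeps + zip by one prefix-sum of active
-- counts and a per-index positive-window-count test (alternative algorithm, same linear shape).

-- ===== PORT A =====
-- forward loop of A, one element: state = (forward list so far, hold)
def pvFwdStep (hangover : Int) (st : List Bool × Int) (a : Bool) : List Bool × Int :=
  let hold := if a then hangover else max (st.2 - 1) 0
  (st.1 ++ [a || decide (0 < hold)], hold)

-- backward loop of A, one index: state = (backward array, hold); idx is always in range,
-- so pyGetD/pySetD are exact for Python's activity[idx] / backward[idx] = …
def pvBwdStep (activity : List Bool) (hangover : Int) (st : List Bool × Int) (idx : Int) : List Bool × Int :=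
  let is_active := PySem.List.pyGetD activity idx false
  let hold := if is_active then hangover else max (st.2 - 1) 0
  (PySem.List.pySetD st.1 idx (is_active || decide (0 < hold)), hold)

def smooth_activity_py (activity : List Bool) (hangover : Int) : List Bool :=
  if hangover ≤ 0 ∨ activity.length = 0 then activity
  else
    let forward := (activity.foldl (pvFwdStep hangover) ([], 0)).1
    let backward :=
      ((PySem.List.pyRange ((activity.length : Int) - 1) (-1) (-1)).foldl
        (pvBwdStep activity hangover) (List.replicate activity.length false, 0)).1
    (forward.zip backward).map (fun p => p.1 || p.2)

-- ===== PORT B =====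
def smooth_activity_py_alt (activity : List Bool) (hangover : Int) : List Bool :=
  if hangover ≤ 0 ∨ activity.length = 0 then activity
  else
    let n : Int := activity.length
    let pref := (activity.foldl
      (fun (st : List Int × Int) a =>
        let c := st.2 + (if a then 1 else 0)
        (st.1 ++ [c], c)) ([0], 0)).1
    (PySem.List.pyRange 0 n 1).map (fun i =>
      decide (0 < PySem.List.pyGetD pref (min n (i + hangover)) 0
                - PySem.List.pyGetD pref (max 0 (i - hangover + 1)) 0))

-- ===== PRECONDITION & SPEC =====
def Spec_smooth_activity_py (activity : List Bool) (hangover : Int) (out : List Bool) : Prop := out = smooth_activity_py_alt activity hangover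
instance (activity : List Bool) (hangover : Int) (out : List Bool) : Decidable (Spec_smooth_activity_py activity hangover out) := by unfold Spec_smooth_activity_py; infer_instance

-- ===== CLAIM (what is proved, stated in full; the proofs are below) =====
def Claim_equal_smooth_activity_py : Prop := ∀ (activity : List Bool) (hangover : Int), Dom_smooth_activity_py activity hangover → Spec_smooth_activity_py activity hangover (smooth_activity_py activity hangover)

-- ===== LEMMAS AND PROOFS =====

def pvFwdP (h : Int) : List Bool → Int → List Bool × Int
  | [], hold => ([], hold)
  | a :: t, hold =>
    let h' := if a then h else max (hold - 1) 0
    let r := pvFwdP h t h'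
    ((a || decide (0 < h')) :: r.1, r.2)

lemma pvFwdP_length (h : Int) (l : List Bool) : ∀ hold, (pvFwdP h l hold).1.length = l.length := by
  induction l with
  | nil => intro hold; simp [pvFwdP]
  | cons a t ih => intro hold; simp [pvFwdP, ih]

lemma pvFwdP_getElem (h : Int) (hpos : 0 < h) (l : List Bool) :
    ∀ (hold : Int) (i : Nat) (hi : i < (pvFwdP h l hold).1.length),
    (pvFwdP h l hold).1[i] =
      decide ((∃ j, ∃ _ : j < l.length, j ≤ i ∧ l[j] = true ∧ (i : Int) - j < h) ∨
              ((∀ j (_ : j < l.length), j ≤ i → l[j] = false) ∧ (i : Int) + 1 < hold)) := by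
  induction l with
  | nil => intro hold i hi; simp [pvFwdP] at hi
  | cons a t ih =>
    intro hold i hi
    cases i with
    | zero =>
      cases a with
      | true =>
        simp only [pvFwdP, List.getElem_cons_zero, if_true, Bool.true_or]
        symm
        rw [decide_eq_true_iff]
        exact Or.inl ⟨0, by simp, le_refl 0, by simp, by simpa using hpos⟩
      | false =>
        simp only [pvFwdP, List.getElem_cons_zero, Bool.false_eq_true, if_false, Bool.false_or]
        rw [decide_eq_decide]
        constructor
        · intro hm
          refine Or.inr ⟨?_, by first | omega | ((try push_cast at *); (try simp only [List.length_cons, pvFwdP_length] at *); omega)⟩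
          intro j hj hj0
          interval_cases j
          · simp
        · rintro (⟨j, hj, hj0, htrue, _⟩ | ⟨_, hhold⟩)
          · interval_cases j
            simp at htrue
          · omega
    | succ m =>
      have hm : m < (pvFwdP h t (if a then h else max (hold - 1) 0)).1.length := by
        simp only [pvFwdP] at hi; simpa using Nat.lt_of_succ_lt_succ hi
      cases a with
      | true =>
        simp only [pvFwdP, if_true, List.getElem_cons_succ]
        rw [ih h m]
        rw [decide_eq_decide]
        constructor
        · rintro (⟨j, hj, hjm, htj, hd⟩ | ⟨hall, hhold⟩)
          · exact Or.inl ⟨j + 1, by first | omega | ((try push_cast at *); (try simp only [List.length_cons, pvFwdP_length] at *); omega), by first | omega | ((try push_cast at *); (try simp only [List.length_cons, pvFwdP_length] at *); omega), by simpa using htj, by push_cast; omega⟩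
          · refine Or.inl ⟨0, by first | omega | ((try push_cast at *); (try simp only [List.length_cons, pvFwdP_length] at *); omega), by first | omega | ((try push_cast at *); (try simp only [List.length_cons, pvFwdP_length] at *); omega), by simp, by push_cast; omega⟩
        · rintro (⟨j, hj, hjm, htj, hd⟩ | ⟨hall, hhold⟩)
          · cases j with
            | zero =>
              -- a at distance m+1 < h
              by_cases hex : ∃ j', ∃ _ : j' < t.length, j' ≤ m ∧ t[j'] = true
              · obtain ⟨j', hj', hj'm, ht'⟩ := hex
                exact Or.inl ⟨j', hj', hj'm, ht', by push_cast at hd ⊢; omega⟩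
              · push_neg at hex
                refine Or.inr ⟨?_, by push_cast at hd ⊢; omega⟩
                intro j' hj' hj'm
                by_contra hc
                exact hex j' hj' hj'm (by simpa using hc)
            | succ j' =>
              exact Or.inl ⟨j', by first | omega | ((try push_cast at *); (try simp only [List.length_cons, pvFwdP_length] at *); omega), by first | omega | ((try push_cast at *); (try simp only [List.length_cons, pvFwdP_length] at *); omega), by simpa using htj, by push_cast at hd ⊢; omega⟩
          · exact absurd (hall 0 (by first | omega | ((try push_cast at *); (try simp only [List.length_cons, pvFwdP_length] at *); omega)) (by first | omega | ((try push_cast at *); (try simp only [List.length_cons, pvFwdP_length] at *); omega))) (by simp)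
      | false =>
        simp only [pvFwdP, Bool.false_eq_true, if_false, List.getElem_cons_succ]
        rw [ih (max (hold - 1) 0) m]
        rw [decide_eq_decide]
        constructor
        · rintro (⟨j, hj, hjm, htj, hd⟩ | ⟨hall, hhold⟩)
          · exact Or.inl ⟨j + 1, by first | omega | ((try push_cast at *); (try simp only [List.length_cons, pvFwdP_length] at *); omega), by first | omega | ((try push_cast at *); (try simp only [List.length_cons, pvFwdP_length] at *); omega), by simpa using htj, by push_cast; omega⟩
          · refine Or.inr ⟨?_, by first | omega | ((try push_cast at *); (try simp only [List.length_cons, pvFwdP_length] at *); omega)⟩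
            intro j hj hjm
            cases j with
            | zero => simp
            | succ j' => exact hall j' (by first | omega | ((try push_cast at *); (try simp only [List.length_cons, pvFwdP_length] at *); omega)) (by first | omega | ((try push_cast at *); (try simp only [List.length_cons, pvFwdP_length] at *); omega))
        · rintro (⟨j, hj, hjm, htj, hd⟩ | ⟨hall, hhold⟩)
          · cases j with
            | zero => simp at htj
            | succ j' => exact Or.inl ⟨j', by first | omega | ((try push_cast at *); (try simp only [List.length_cons, pvFwdP_length] at *); omega), by first | omega | ((try push_cast at *); (try simp only [List.length_cons, pvFwdP_length] at *); omega), by simpa using htj, by push_cast at hd ⊢; omega⟩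
          · refine Or.inr ⟨?_, by first | omega | ((try push_cast at *); (try simp only [List.length_cons, pvFwdP_length] at *); omega)⟩
            intro j hj hjm
            exact hall (j + 1) (by first | omega | ((try push_cast at *); (try simp only [List.length_cons, pvFwdP_length] at *); omega)) (by first | omega | ((try push_cast at *); (try simp only [List.length_cons, pvFwdP_length] at *); omega))

def pvBwdP (h : Int) : List Bool → Int → List Bool × Int
  | [], hold => ([], hold)
  | a :: t, hold0 =>
    let r := pvBwdP h t hold0
    let h' := if a then h else max (r.2 - 1) 0
    ((a || decide (0 < h')) :: r.1, h')

lemma pvRange_desc (n k : Nat) (hk : k ≤ n) :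
    PySem.List.pyRange ((n : Int) - 1) ((k : Int) - 1) (-1) =
      (List.range (n - k)).map (fun j : Nat => (n : Int) - 1 - (j : Int)) := by
  simp only [PySem.List.pyRange]
  norm_num
  rcases Nat.eq_or_lt_of_le hk with h | h
  · subst h; simp
  · rw [if_pos h]
    apply List.map_congr_left
    intro j hj
    ring

lemma pvSetMid {α : Type} (v : α) (r : List α) : ∀ (arr : List α) (k : Nat), k < arr.length →
    (arr.take (k+1) ++ r).set k v = arr.take k ++ v :: r := by
  intro arr
  induction arr with
  | nil => intro k hk; simp at hk
  | cons a t ih =>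
    intro k hk
    cases k with
    | zero => simp
    | succ m => simp [ih m (by simpa using Nat.lt_of_succ_lt_succ hk)]

lemma pvBwd_fold (h : Int) (l : List Bool) : ∀ (d k : Nat), k ≤ l.length → l.length - k = d →
    ∀ (arr : List Bool) (hold : Int), arr.length = l.length →
    (PySem.List.pyRange ((l.length : Int) - 1) ((k : Int) - 1) (-1)).foldl (pvBwdStep l h) (arr, hold)
      = (arr.take k ++ (pvBwdP h (l.drop k) hold).1, (pvBwdP h (l.drop k) hold).2) := by
  intro d
  induction d with
  | zero =>
    intro k hk hd arr hold harr
    have hkl : k = l.length := by omega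
    subst hkl
    rw [pvRange_desc l.length l.length (le_refl _)]
    simp [pvBwdP, List.take_of_length_le (le_of_eq harr)]
  | succ d ih =>
    intro k hk hd arr hold harr
    have hklt : k < l.length := by omega
    rw [pvRange_desc l.length k (le_of_lt hklt)]
    have hnk : l.length - k = d + 1 := hd
    rw [hnk, List.range_succ, List.map_append, List.foldl_append]
    have hmapeq : (List.range d).map (fun j : Nat => (l.length : Int) - 1 - (j : Int))
        = PySem.List.pyRange ((l.length : Int) - 1) (((k + 1 : Nat) : Int) - 1) (-1) := by
      rw [pvRange_desc l.length (k+1) (by omega)]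
      have hde : l.length - (k+1) = d := by omega
      rw [hde]
    rw [hmapeq, ih (k+1) (by omega) (by omega) arr hold harr]
    have hfd : (l.length : Int) - 1 - (d : Int) = (k : Int) := by omega
    simp only [List.map_cons, List.map_nil, List.foldl_cons, List.foldl_nil, hfd]
    have hdropk : l.drop k = l[k] :: l.drop (k+1) := (List.getElem_cons_drop hklt).symm
    rw [hdropk]
    simp only [pvBwdStep, pvBwdP, PySem.List.pyGetD_natCast, PySem.List.pySetD_natCast]
    have hget : l.getD k false = l[k] := List.getD_eq_getElem l false hklt
    rw [hget, pvSetMid _ _ arr k (by omega)]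

lemma pvFwdP_snoc (h : Int) (s : List Bool) (a : Bool) (hold : Int) :
    pvFwdP h (s ++ [a]) hold =
      ((pvFwdP h s hold).1 ++ [a || decide (0 < (if a then h else max ((pvFwdP h s hold).2 - 1) 0))],
       if a then h else max ((pvFwdP h s hold).2 - 1) 0) := by
  induction s generalizing hold with
  | nil => simp [pvFwdP]
  | cons b t ih => simp only [List.cons_append, pvFwdP, ih]

lemma pvBwd_mirror (h : Int) (l : List Bool) (hold : Int) :
    pvBwdP h l hold = ((pvFwdP h l.reverse hold).1.reverse, (pvFwdP h l.reverse hold).2) := by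
  induction l with
  | nil => simp [pvBwdP, pvFwdP]
  | cons a t ih =>
    simp only [pvBwdP, ih, List.reverse_cons, pvFwdP_snoc]
    simp

lemma pvBwdP_length (h : Int) (l : List Bool) (hold : Int) : (pvBwdP h l hold).1.length = l.length := by
  rw [pvBwd_mirror]
  simp [pvFwdP_length]

lemma pvCount_window (l : List Bool) (a b : Nat) (hab : a ≤ b) (hb : b ≤ l.length) :
    (0 < (((l.take b).countP id : Nat) : Int) - (((l.take a).countP id : Nat) : Int)) ↔
      ∃ j, ∃ _ : j < l.length, a ≤ j ∧ j < b ∧ l[j] = true := by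
  have hsplit : l.take b = l.take a ++ (l.drop a).take (b - a) := by
    rw [← List.take_add]
    congr 1
    omega
  rw [hsplit, List.countP_append]
  have hlen : ((l.drop a).take (b - a)).length = b - a := by
    simp [List.length_take, List.length_drop]
    omega
  constructor
  · intro hpos
    have : 0 < ((l.drop a).take (b - a)).countP id := by omega
    rw [List.countP_pos_iff] at this
    obtain ⟨x, hx, hid⟩ := this
    rw [List.mem_iff_getElem] at hx
    obtain ⟨m, hm, hxm⟩ := hx
    have hm' : m < b - a := by omega
    have hgm : ((l.drop a).take (b - a))[m]'hm = l[a + m]'(by omega) := by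
      simp [List.getElem_take, List.getElem_drop]
    refine ⟨a + m, by omega, by omega, by omega, ?_⟩
    rw [← hgm, hxm]
    simpa using hid
  · rintro ⟨j, hj, haj, hjb, htrue⟩
    have : 0 < ((l.drop a).take (b - a)).countP id := by
      rw [List.countP_pos_iff]
      refine ⟨l[j], ?_, by simpa using htrue⟩
      rw [List.mem_iff_getElem]
      refine ⟨j - a, by omega, ?_⟩
      have : ((l.drop a).take (b - a))[j - a]'(by omega) = l[a + (j - a)]'(by omega) := by
        simp [List.getElem_take, List.getElem_drop]
      rw [this]
      congr 1
      omega
    omega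

def pvPre : List Bool → Int → List Int
  | [], _ => []
  | a :: t, c => (c + (if a then 1 else 0)) :: pvPre t (c + (if a then 1 else 0))

lemma pvPre_fold (l : List Bool) : ∀ (acc : List Int) (c : Int),
    l.foldl (fun (st : List Int × Int) a =>
        let c := st.2 + (if a then 1 else 0)
        (st.1 ++ [c], c)) (acc, c) = (acc ++ pvPre l c, c + ((l.countP id : Nat) : Int)) := by
  induction l with
  | nil => intro acc c; simp [pvPre]
  | cons a t ih =>
    intro acc c
    simp only [List.foldl_cons, pvPre]
    rw [ih]
    cases a <;> simp <;> ring_nf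

lemma pvPre_getElem (l : List Bool) : ∀ (c : Int) (k : Nat) (hk : k < (pvPre l c).length),
    (pvPre l c)[k] = c + (((l.take (k + 1)).countP id : Nat) : Int) := by
  induction l with
  | nil => intro c k hk; simp [pvPre] at hk
  | cons a t ih =>
    intro c k hk
    cases k with
    | zero => cases a <;> simp [pvPre, List.countP_cons]
    | succ m =>
      simp only [pvPre, List.getElem_cons_succ]
      rw [ih]
      cases a <;> simp [List.countP_cons] <;> push_cast <;> ring_nf

lemma pvPre_length (l : List Bool) (c : Int) : (pvPre l c).length = l.length := by
  induction l generalizing c with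
  | nil => simp [pvPre]
  | cons a t ih => simp [pvPre, ih]

lemma pvPref_at (l : List Bool) (m : Nat) (hm : m ≤ l.length) :
    (0 :: pvPre l 0).getD m 0 = (((l.take m).countP id : Nat) : Int) := by
  cases m with
  | zero => simp
  | succ m' =>
    have hlt : m' < (pvPre l 0).length := by rw [pvPre_length]; omega
    simp only [List.getD_cons_succ]
    rw [List.getD_eq_getElem _ _ hlt, pvPre_getElem l 0 m' hlt]
    simp

lemma pvPointwise (h : Int) (hpos : 0 < h) (l : List Bool) (i : Nat)
    (hf : i < (pvFwdP h l 0).1.length) (hb : i < (pvBwdP h l 0).1.length) :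
    ((pvFwdP h l 0).1[i] || (pvBwdP h l 0).1[i]) =
      decide (∃ j, ∃ _ : j < l.length,
        (max 0 ((i : Int) - h + 1)).toNat ≤ j ∧ j < (min (l.length : Int) ((i : Int) + h)).toNat ∧ l[j] = true) := by
  have hi : i < l.length := by rwa [pvFwdP_length] at hf
  have hrev : (pvBwdP h l 0).1 = (pvFwdP h l.reverse 0).1.reverse := by rw [pvBwd_mirror]
  rw [pvFwdP_getElem h hpos l 0 i hf]
  rw [List.getElem_of_eq hrev hb, List.getElem_reverse]
  rw [pvFwdP_getElem h hpos l.reverse 0 _ (by simp [pvFwdP_length] at hb ⊢; omega)]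
  rw [← Bool.decide_or, decide_eq_decide]
  have hn0 : ¬((i : Int) + 1 < 0) := by omega
  have hn1 : ¬(((l.length - 1 - i : Nat) : Int) + 1 < 0) := by omega
  have hlenrev : (pvFwdP h l.reverse 0).1.length = l.length := by simp [pvFwdP_length]
  simp only [hlenrev, List.length_reverse, List.getElem_reverse, hn0, hn1, and_false, false_and, or_false]
  constructor
  · rintro (⟨j, hj, hji, hl, hd⟩ | ⟨j, hj, hji, hl, hd⟩)
    · exact ⟨j, hj, by omega, by omega, hl⟩
    · refine ⟨l.length - 1 - j, by omega, by omega, by omega, ?_⟩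
      convert hl using 2
  · rintro ⟨j, hj, haj, hjb, hl⟩
    by_cases hji : j ≤ i
    · exact Or.inl ⟨j, hj, hji, hl, by omega⟩
    · refine Or.inr ⟨l.length - 1 - j, by omega, by omega, ?_, by omega⟩
      convert hl using 2
      all_goals omega

lemma pvFwd_fold (h : Int) (l : List Bool) : ∀ (acc : List Bool) (hold : Int),
    l.foldl (pvFwdStep h) (acc, hold) = (acc ++ (pvFwdP h l hold).1, (pvFwdP h l hold).2) := by
  induction l with
  | nil => intro acc hold; simp [pvFwdP]
  | cons a t ih =>
    intro acc hold
    simp only [List.foldl_cons, pvFwdStep, pvFwdP]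
    rw [ih]
    simp

lemma pvAltPoint (l : List Bool) (h : Int) (hpos : 0 < h) (i : Nat) (hi : i < l.length) :
    (decide (0 < PySem.List.pyGetD (0 :: pvPre l 0) (min ((l.length : Int)) ((i : Int) + h)) 0
               - PySem.List.pyGetD (0 :: pvPre l 0) (max 0 ((i : Int) - h + 1)) 0))
    = decide (∃ j, ∃ _ : j < l.length,
        (max 0 ((i : Int) - h + 1)).toNat ≤ j ∧ j < (min ((l.length : Int)) ((i : Int) + h)).toNat ∧ l[j] = true) := by
  have hbpos : (0 : Int) ≤ min ((l.length : Int)) ((i : Int) + h) := by omega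
  have hapos : (0 : Int) ≤ max 0 ((i : Int) - h + 1) := le_max_left _ _
  rw [PySem.List.pyGetD_of_nonneg _ _ hbpos, PySem.List.pyGetD_of_nonneg _ _ hapos]
  rw [pvPref_at l _ (by omega), pvPref_at l _ (by omega)]
  rw [decide_eq_decide]
  exact pvCount_window l _ _ (by omega) (by omega)

lemma pv_main (l : List Bool) (h : Int) : smooth_activity_py l h = smooth_activity_py_alt l h := by
  by_cases hg : h ≤ 0 ∨ l.length = 0
  · unfold smooth_activity_py smooth_activity_py_alt
    rw [if_pos hg, if_pos hg]
  · have hpos : 0 < h := by rcases not_or.mp hg with ⟨h1, _⟩; omega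
    have hn : 0 < l.length := by rcases not_or.mp hg with ⟨_, h2⟩; omega
    have hbk := pvBwd_fold h l l.length 0 (by omega) (by omega) (List.replicate l.length false) 0 (by simp)
    norm_num at hbk
    have hA : smooth_activity_py l h
        = ((pvFwdP h l 0).1.zip (pvBwdP h l 0).1).map (fun p => p.1 || p.2) := by
      unfold smooth_activity_py
      rw [if_neg hg]
      simp only [pvFwd_fold, hbk, List.nil_append]
    have hB : smooth_activity_py_alt l h
        = (PySem.List.pyRange 0 (l.length : Int) 1).map (fun i =>
            decide (0 < PySem.List.pyGetD (0 :: pvPre l 0) (min ((l.length : Int)) (i + h)) 0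
                      - PySem.List.pyGetD (0 :: pvPre l 0) (max 0 (i - h + 1)) 0)) := by
      unfold smooth_activity_py_alt
      rw [if_neg hg]
      simp only [pvPre_fold, List.singleton_append]
    rw [hA, hB]
    apply List.ext_getElem
    · simp [pvFwdP_length, pvBwdP_length, PySem.List.length_pyRange_one]
    · intro i h1 h2
      have hi : i < l.length := by
        simp [pvFwdP_length, pvBwdP_length] at h1
        omega
      rw [List.getElem_map, List.getElem_zip]
      rw [List.getElem_map, PySem.List.getElem_pyRange_one]
      rw [pvPointwise h hpos l i (by simp [pvFwdP_length]; omega) (by simp [pvBwdP_length]; omega)]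
      rw [← pvAltPoint l h hpos i hi]
      norm_num

-- ===== VERDICT (by name: the statement is the Claim_ definition above) =====
theorem smooth_activity_py_spec : Claim_equal_smooth_activity_py := by
  intro activity hangover _
  unfold Spec_smooth_activity_py
  exact pv_main activity hangover
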